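-- pv_equiv track=rewrite | github.com/Mussylman/speed_limit | src/kz_plate.py | kz_score_7
-- ===== SOURCE A (Python) =====
-- def kz_score_7(text: str) -> int:
--     """Оценка соответствия 7-символьного KZ формату (0-7)."""
--     if len(text) != 7:
--         return 0
--     score = 0
--     for i in range(3):
--         if text[i].isdigit():
--             score += 1
--     for i in range(3, 5):
--         if text[i].isalpha():
--             score += 1
--     for i in range(5, 7):
--         if text[i].isdigit():
--             score += 1
--     return score
-- ===== SOURCE B (Python) =====
-- def kz_score_7(text: str) -> int:
--     """Оценка соответствия 7-символьного KZ формату (0-7)."""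
--     if len(text) != 7:
--         return 0
--     # Positions 0-2 and 5-6 want digits, 3-4 want letters:
--     # count digits in the whole string, then swap the middle slice's
--     # contribution from digit-count to letter-count.
--     mid = text[3:5]
--     return (sum(c.isdigit() for c in text)
--             - sum(c.isdigit() for c in mid)
--             + sum(c.isalpha() for c in mid))
-- ===== Notes on version B (the rewrite author's own statement) =====
-- stated objective: alternative
-- what changed: Instead of scanning three hardcoded positional ranges, B counts digits over the whole string once and applies a correction on the middle slice text[3:5] (subtracting its digit count and adding its letter count).
import Mathlib
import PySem

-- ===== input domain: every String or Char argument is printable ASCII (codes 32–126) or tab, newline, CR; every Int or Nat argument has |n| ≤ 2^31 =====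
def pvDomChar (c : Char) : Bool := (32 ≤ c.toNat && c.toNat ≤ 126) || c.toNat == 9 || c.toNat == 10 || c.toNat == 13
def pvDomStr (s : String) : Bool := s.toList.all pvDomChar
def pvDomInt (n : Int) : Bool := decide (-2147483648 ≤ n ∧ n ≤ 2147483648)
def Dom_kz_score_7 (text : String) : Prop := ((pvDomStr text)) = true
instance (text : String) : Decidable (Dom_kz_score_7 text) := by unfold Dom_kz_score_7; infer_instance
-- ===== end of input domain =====

-- B computes the score as a whole-string digit count plus a correction on the middle slice text[3:5] (alternative decomposition, same cost).
-- ===== PORT A =====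
def kz_score_7 (text : String) : Int :=
  if PySem.Str.len text ≠ 7 then 0 else
    let s1 := (PySem.List.pyRange 0 3 1).foldl
      (fun s i => if PySem.Chars.isdigit (PySem.List.pyGetD text.toList i ' ') then s + 1 else s) 0
    let s2 := (PySem.List.pyRange 3 5 1).foldl
      (fun s i => if PySem.Chars.isalpha (PySem.List.pyGetD text.toList i ' ') then s + 1 else s) s1
    (PySem.List.pyRange 5 7 1).foldl
      (fun s i => if PySem.Chars.isdigit (PySem.List.pyGetD text.toList i ' ') then s + 1 else s) s2

-- ===== PORT B =====
def kz_score_7_alt (text : String) : Int :=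
  if PySem.Str.len text ≠ 7 then 0 else
    let mid := PySem.List.slice text.toList (some 3) (some 5)
    ((text.toList.countP PySem.Chars.isdigit : Int)
      - (mid.countP PySem.Chars.isdigit : Int)
      + (mid.countP PySem.Chars.isalpha : Int))

-- ===== PRECONDITION & SPEC =====
def Spec_kz_score_7 (text : String) (out : Int) : Prop := out = kz_score_7_alt text
instance (text : String) (out : Int) : Decidable (Spec_kz_score_7 text out) := by unfold Spec_kz_score_7; infer_instance

-- ===== CLAIM (what is proved, stated in full; the proofs are below) =====
def Claim_equal_kz_score_7 : Prop := ∀ (text : String), Dom_kz_score_7 text → Spec_kz_score_7 text (kz_score_7 text)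

-- ===== LEMMAS AND PROOFS =====

-- ===== VERDICT (by name: the statement is the Claim_ definition above) =====
set_option maxHeartbeats 1000000 in
theorem kz_score_7_spec : Claim_equal_kz_score_7 := by
  intro text _
  unfold Spec_kz_score_7 kz_score_7 kz_score_7_alt
  rcases eq_or_ne (PySem.Str.len text) 7 with h | h
  · have hlen : text.toList.length = 7 := by
      rw [PySem.Str.len_eq] at h; exact_mod_cast h
    obtain ⟨a, b, c, d, e, f, g, hl⟩ :
        ∃ a b c d e f g, text.toList = [a, b, c, d, e, f, g] := by
      match htl : text.toList, hlen with
      | [a, b, c, d, e, f, g], _ => exact ⟨a, b, c, d, e, f, g, rfl⟩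
    simp only [PySem.Str.len_eq, hl]
    rw [if_neg (by norm_num), if_neg (by norm_num)]
    have r1 : PySem.List.pyRange 0 3 1 = [0, 1, 2] := by decide
    have r2 : PySem.List.pyRange 3 5 1 = [3, 4] := by decide
    have r3 : PySem.List.pyRange 5 7 1 = [5, 6] := by decide
    have hs : PySem.List.slice [a, b, c, d, e, f, g] (some 3) (some 5) = [d, e] := by
      simp [PySem.List.slice]
    rw [r1, r2, r3, hs]
    simp only [List.foldl, PySem.List.pyGetD_ofNat', List.getD,
      List.getElem?_cons_zero, List.getElem?_cons_succ, Option.getD_some,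
      List.countP_cons, List.countP_nil]
    split_ifs <;> push_cast
  · rw [PySem.Str.len_eq] at h
    rw [if_pos (by rw [PySem.Str.len_eq]; exact h),
        if_pos (by rw [PySem.Str.len_eq]; exact h)]
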